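-- pv_equiv track=rewrite | github.com/rizerphe/gamebattle-backend | gamebattle_backend/launcher.py | filename_component_valid
-- ===== SOURCE A (Python) =====
-- import string
--
-- def filename_component_valid(component: str, strict: bool = False) -> bool:
--     """Check if a file name component is valid.
--
--     Args:
--         component (str): The component of the file name
--         strict (bool): Whether to be strict about the file name component
--
--     Returns:
--         bool: Whether the file name component is valid
--     """
--     if len(component) > 255:
--         return False
--     if len(component) == 0:
--         return False
--     allowed_chars = (
--         string.ascii_uppercase
--         + string.ascii_lowercase
--         + string.digits
--         + "_-."
--         + ("" if strict else "  ")
--     )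
--     if not all(char in allowed_chars for char in component):
--         return False
--     required_chars = (
--         string.ascii_uppercase + string.ascii_lowercase + string.digits + "_-"
--     )
--     return any(char in required_chars for char in component)
-- ===== SOURCE B (Python) =====
-- def filename_component_valid(component: str, strict: bool = False) -> bool:
--     """Single left-to-right pass: classify each char by its code (required /
--     filler / forbidden), exiting early on a forbidden char, while tracking
--     whether a required char was seen."""
--     if not 1 <= len(component) <= 255:
--         return False
--     has_required = False
--     for ch in component:
--         o = ord(ch)
--         if 65 <= o <= 90 or 97 <= o <= 122 or 48 <= o <= 57 or ch == "_" or ch == "-":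
--             has_required = True
--         elif ch == "." or (not strict and ch == " "):
--             pass
--         else:
--             return False
--     return has_required
-- ===== Notes on version B (the rewrite author's own statement) =====
-- stated objective: alternative
-- what changed: Replaces A's two staged membership scans over a built allowed-characters string (all-allowed, then any-required) with a single left-to-right pass that classifies each character arithmetically by its code point (required / filler / forbidden), returns False early on the first forbidden character, and carries a has_required accumulator.
import Mathlib
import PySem

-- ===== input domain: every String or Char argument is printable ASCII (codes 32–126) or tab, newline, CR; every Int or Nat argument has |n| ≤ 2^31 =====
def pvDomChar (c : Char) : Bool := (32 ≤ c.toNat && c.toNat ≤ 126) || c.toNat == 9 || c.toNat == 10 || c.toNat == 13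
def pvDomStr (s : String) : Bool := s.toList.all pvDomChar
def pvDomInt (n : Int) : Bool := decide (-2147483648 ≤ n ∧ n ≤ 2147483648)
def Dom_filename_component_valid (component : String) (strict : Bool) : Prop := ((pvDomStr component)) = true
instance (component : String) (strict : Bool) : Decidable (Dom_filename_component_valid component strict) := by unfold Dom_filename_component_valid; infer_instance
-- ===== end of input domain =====

-- B replaces A's two staged membership scans over a built allowed-characters string by a
-- single left-to-right pass that classifies each char arithmetically by its code point
-- (required / filler / forbidden) with early exit and a has_required accumulator
-- (objective: alternative, same asymptotic cost).


-- shared character constants (string.ascii_uppercase, string.ascii_lowercase, string.digits)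
def pyUpper : List Char := ['A','B','C','D','E','F','G','H','I','J','K','L','M','N','O','P','Q','R','S','T','U','V','W','X','Y','Z']
def pyLower : List Char := ['a','b','c','d','e','f','g','h','i','j','k','l','m','n','o','p','q','r','s','t','u','v','w','x','y','z']
def pyDigits : List Char := ['0','1','2','3','4','5','6','7','8','9']

-- ===== PORT A =====
def filename_component_valid (component : String) (strict : Bool) : Bool :=
  let cs := component.toList
  if cs.length > 255 then false
  else if cs.length == 0 then false
  else
    let allowed_chars := pyUpper ++ pyLower ++ pyDigits ++ ['_','-','.']
        ++ (if strict then ([] : List Char) else [' ',' '])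
    if !(cs.all (fun c => allowed_chars.contains c)) then false
    else
      let required_chars := pyUpper ++ pyLower ++ pyDigits ++ ['_','-']
      cs.any (fun c => required_chars.contains c)

-- ===== PORT B =====
-- '65 <= o <= 90 or 97 <= o <= 122 or 48 <= o <= 57 or ch == "_" or ch == "-"'
def fcvRequired (c : Char) : Bool :=
  (65 ≤ c.toNat && c.toNat ≤ 90) || (97 ≤ c.toNat && c.toNat ≤ 122)
    || (48 ≤ c.toNat && c.toNat ≤ 57) || c == '_' || c == '-'

-- the for-loop with early return, carried as structural recursion over the chars
def fcvLoop (strict : Bool) : List Char → Bool → Bool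
  | [], hasReq => hasReq
  | c :: rest, hasReq =>
    if fcvRequired c then fcvLoop strict rest true
    else if c == '.' || (!strict && c == ' ') then fcvLoop strict rest hasReq
    else false

def filename_component_valid_alt (component : String) (strict : Bool) : Bool :=
  if 1 ≤ component.toList.length ∧ component.toList.length ≤ 255 then
    fcvLoop strict component.toList false
  else false

-- ===== PRECONDITION & SPEC =====
def Spec_filename_component_valid (component : String) (strict : Bool) (out : Bool) : Prop := out = filename_component_valid_alt component strict
instance (component : String) (strict : Bool) (out : Bool) : Decidable (Spec_filename_component_valid component strict out) := by unfold Spec_filename_component_valid; infer_instance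

-- ===== CLAIM (what is proved, stated in full; the proofs are below) =====
def Claim_equal_filename_component_valid : Prop := ∀ (component : String) (strict : Bool), Dom_filename_component_valid component strict → Spec_filename_component_valid component strict (filename_component_valid component strict)

-- ===== LEMMAS AND PROOFS =====

-- B's filler test, named for the proofs
def fcvAllowed (strict : Bool) (c : Char) : Bool :=
  fcvRequired c || (c == '.' || (!strict && c == ' '))

-- bridge: on domain chars, A's membership tests equal B's code-point tests
lemma required_bridge (c : Char) (h : pvDomChar c = true) :
    (pyUpper ++ pyLower ++ pyDigits ++ ['_','-']).contains c = fcvRequired c := by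
  have hn : Char.ofNat c.toNat = c := Char.ofNat_toNat c
  have hb : c.toNat ≤ 126 := by
    simp [pvDomChar] at h
    omega
  rw [← hn]
  set n := c.toNat with hdef
  clear_value n
  interval_cases n <;> decide

lemma allowed_bridge (c : Char) (strict : Bool) (h : pvDomChar c = true) :
    ((pyUpper ++ pyLower ++ pyDigits ++ ['_','-','.']
        ++ (if strict then ([] : List Char) else [' ',' '])).contains c)
      = fcvAllowed strict c := by
  have hn : Char.ofNat c.toNat = c := Char.ofNat_toNat c
  have hb : c.toNat ≤ 126 := by
    simp [pvDomChar] at h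
    omega
  rw [← hn]
  set n := c.toNat with hdef
  clear_value n
  cases strict <;> (interval_cases n <;> decide)

-- pointwise congruence for all/any (used to swap membership tests for code-point tests)
lemma pvAllCongr {α : Type} {l : List α} {f g : α → Bool}
    (h : ∀ a ∈ l, f a = g a) : l.all f = l.all g := by
  induction l with
  | nil => rfl
  | cons a l ih =>
    simp only [List.all_cons, h a (List.mem_cons_self ..),
      ih fun b hb => h b (List.mem_cons_of_mem a hb)]

lemma pvAnyCongr {α : Type} {l : List α} {f g : α → Bool}
    (h : ∀ a ∈ l, f a = g a) : l.any f = l.any g := by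
  induction l with
  | nil => rfl
  | cons a l ih =>
    simp only [List.any_cons, h a (List.mem_cons_self ..),
      ih fun b hb => h b (List.mem_cons_of_mem a hb)]

-- characterisation of B's loop: allowed everywhere, and required somewhere (or carried in)
lemma fcvLoop_eq (strict : Bool) (cs : List Char) (hasReq : Bool) :
    fcvLoop strict cs hasReq
      = (cs.all (fcvAllowed strict) && (hasReq || cs.any fcvRequired)) := by
  induction cs generalizing hasReq with
  | nil => simp [fcvLoop]
  | cons c rest ih =>
    by_cases hr : fcvRequired c = true
    · simp [fcvLoop, hr, ih, fcvAllowed]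
    · simp only [Bool.not_eq_true] at hr
      by_cases hf : (c == '.' || (!strict && c == ' ')) = true
      · simp [fcvLoop, hr, hf, ih, fcvAllowed]
      · simp only [Bool.not_eq_true] at hf
        simp [fcvLoop, hr, hf, fcvAllowed]

-- ===== VERDICT (by name: the statement is the Claim_ definition above) =====
theorem filename_component_valid_spec : Claim_equal_filename_component_valid := by
  intro component strict hdom
  unfold Spec_filename_component_valid filename_component_valid filename_component_valid_alt
  have hdom' : ∀ c ∈ component.toList, pvDomChar c = true := by
    simpa [Dom_filename_component_valid, pvDomStr, List.all_eq_true] using hdom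
  set cs := component.toList with hcs
  by_cases hlong : cs.length > 255
  · have : ¬ (1 ≤ cs.length ∧ cs.length ≤ 255) := by omega
    simp [hlong, this]
  · by_cases hnil : cs.length = 0
    · simp [hnil]
    · have hok : (1 ≤ cs.length ∧ cs.length ≤ 255) := by omega
      rw [if_neg hlong, if_neg (by simpa using hnil), if_pos hok, fcvLoop_eq]
      have hall : (cs.all fun c =>
          (pyUpper ++ pyLower ++ pyDigits ++ ['_','-','.']
            ++ (if strict then ([] : List Char) else [' ',' '])).contains c)
          = cs.all (fcvAllowed strict) :=
        pvAllCongr (fun c hc => allowed_bridge c strict (hdom' c hc))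
      have hany : (cs.any fun c => (pyUpper ++ pyLower ++ pyDigits ++ ['_','-']).contains c)
          = cs.any fcvRequired :=
        pvAnyCongr (fun c hc => required_bridge c (hdom' c hc))
      simp only [hall, hany]
      by_cases ha : cs.all (fcvAllowed strict) = true
      · simp [ha]
      · simp only [Bool.not_eq_true] at ha
        simp [ha]
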